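-- pv_equiv track=rewrite | github.com/rayimanoj-oliva/wb-crm | controllers/components/lead_appointment_flow/zoho_lead_retrieval.py | _extract_appointment_details
-- ===== SOURCE A (Python) =====
-- from typing import Dict, Any, Optional, List
--
-- def _extract_appointment_details(description: str) -> Dict[str, str]:
--     """Extract appointment details from lead description"""
--
--     details = {
--         "city": "Unknown",
--         "clinic": "Unknown",
--         "preferred_date": "Not specified",
--         "preferred_time": "Not specified",
--         "status": "Unknown",
--         "preference": ""
--     }
--
--     if not description:
--         return details
--
--     # Parse description for appointment details
--     parts = description.split(" | ")
--
--     for part in parts: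
--         if part.startswith("City:"):
--             details["city"] = part.replace("City:", "").strip()
--         elif part.startswith("Clinic:"):
--             details["clinic"] = part.replace("Clinic:", "").strip()
--         elif part.startswith("Preferred Date:"):
--             details["preferred_date"] = part.replace("Preferred Date:", "").strip()
--         elif part.startswith("Preferred Time:"):
--             details["preferred_time"] = part.replace("Preferred Time:", "").strip()
--         elif part.startswith("Status:"):
--             details["status"] = part.replace("Status:", "").strip()
--         elif part.startswith("Preference:"):
--             details["preference"] = part.replace("Preference:", "").strip()
--
--     return details
-- ===== SOURCE B (Python) =====
-- def _extract_appointment_details(description: str) -> dict: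
--     """Each field is computed independently: the value comes from the LAST
--     part carrying its prefix (later parts overwrite earlier ones in A), or
--     the default if no part carries it.  Correct because no part can start
--     with two of the six prefixes, so A's if/elif order is immaterial."""
--     parts = description.split(" | ")
--
--     def last_value(prefix: str, default: str) -> str:
--         for part in reversed(parts):
--             if part.startswith(prefix):
--                 return part.replace(prefix, "").strip()
--         return default
--
--     return {
--         "city": last_value("City:", "Unknown"),
--         "clinic": last_value("Clinic:", "Unknown"),
--         "preferred_date": last_value("Preferred Date:", "Not specified"),
--         "preferred_time": last_value("Preferred Time:", "Not specified"),
--         "status": last_value("Status:", "Unknown"),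
--         "preference": last_value("Preference:", ""),
--     }
-- ===== Notes on version B (the rewrite author's own statement) =====
-- stated objective: alternative
-- what changed: Instead of one forward pass mutating a defaults dict through a six-way if/elif chain, B computes each of the six fields independently by a backward search for the last part carrying that field's prefix (valid since the prefixes are mutually exclusive), building the result dict in one literal.
import Mathlib
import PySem

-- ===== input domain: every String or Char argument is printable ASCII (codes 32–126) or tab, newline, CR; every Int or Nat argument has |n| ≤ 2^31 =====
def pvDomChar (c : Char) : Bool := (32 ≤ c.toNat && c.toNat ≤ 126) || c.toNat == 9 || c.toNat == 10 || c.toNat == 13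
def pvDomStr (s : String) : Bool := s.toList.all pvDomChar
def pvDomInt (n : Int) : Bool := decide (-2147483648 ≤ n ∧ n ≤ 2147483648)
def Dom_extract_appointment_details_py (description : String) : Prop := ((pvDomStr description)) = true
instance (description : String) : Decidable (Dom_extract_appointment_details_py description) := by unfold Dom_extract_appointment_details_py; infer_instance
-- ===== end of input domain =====

-- B computes each field independently by a backward search for the last part carrying its prefix (valid since the six prefixes are mutually exclusive), instead of A's forward pass mutating a defaults dict through a six-way if/elif chain (alternative; same cost).


-- ===== PORT A =====
def pvDefaultsA : PySem.Dict String String :=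
  PySem.Dict.ofList [("city", "Unknown"), ("clinic", "Unknown"),
    ("preferred_date", "Not specified"), ("preferred_time", "Not specified"),
    ("status", "Unknown"), ("preference", "")]

def pvStepA (d : PySem.Dict String String) (part : String) : PySem.Dict String String :=
  if PySem.Str.startswith part "City:" then
    d.insert "city" (PySem.Str.strip (PySem.Str.replace part "City:" ""))
  else if PySem.Str.startswith part "Clinic:" then
    d.insert "clinic" (PySem.Str.strip (PySem.Str.replace part "Clinic:" ""))
  else if PySem.Str.startswith part "Preferred Date:" then
    d.insert "preferred_date" (PySem.Str.strip (PySem.Str.replace part "Preferred Date:" ""))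
  else if PySem.Str.startswith part "Preferred Time:" then
    d.insert "preferred_time" (PySem.Str.strip (PySem.Str.replace part "Preferred Time:" ""))
  else if PySem.Str.startswith part "Status:" then
    d.insert "status" (PySem.Str.strip (PySem.Str.replace part "Status:" ""))
  else if PySem.Str.startswith part "Preference:" then
    d.insert "preference" (PySem.Str.strip (PySem.Str.replace part "Preference:" ""))
  else d

def extract_appointment_details_py (description : String) : List (String × String) :=
  if description = "" then pvDefaultsA.items
  else
    let parts := (PySem.Str.split? description " | ").getD []
    (parts.foldl pvStepA pvDefaultsA).items

-- ===== PORT B =====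
-- 'for part in reversed(parts): if part.startswith(pfx): return part.replace(pfx,"").strip(); return dflt'
def pvLastValue (parts : List String) (pfx dflt : String) : String :=
  match parts.reverse.find? (fun part => PySem.Str.startswith part pfx) with
  | some part => PySem.Str.strip (PySem.Str.replace part pfx "")
  | none => dflt

def extract_appointment_details_py_alt (description : String) : List (String × String) :=
  let parts := (PySem.Str.split? description " | ").getD []
  [("city", pvLastValue parts "City:" "Unknown"),
   ("clinic", pvLastValue parts "Clinic:" "Unknown"),
   ("preferred_date", pvLastValue parts "Preferred Date:" "Not specified"),
   ("preferred_time", pvLastValue parts "Preferred Time:" "Not specified"),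
   ("status", pvLastValue parts "Status:" "Unknown"),
   ("preference", pvLastValue parts "Preference:" "")]

-- ===== PRECONDITION & SPEC =====
def Spec_extract_appointment_details_py (description : String) (out : List (String × String)) : Prop := out = extract_appointment_details_py_alt description
instance (description : String) (out : List (String × String)) : Decidable (Spec_extract_appointment_details_py description out) := by unfold Spec_extract_appointment_details_py; infer_instance

-- ===== CLAIM (what is proved, stated in full; the proofs are below) =====
def Claim_equal_extract_appointment_details_py : Prop := ∀ (description : String), Dom_extract_appointment_details_py description → Spec_extract_appointment_details_py description (extract_appointment_details_py description)

-- ===== LEMMAS AND PROOFS =====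

-- prefixes of a common list are comparable
theorem pv_prefix_total {α : Type} (u v w : List α) (hu : u <+: w) (hv : v <+: w) : u <+: v ∨ v <+: u := by
  rcases Nat.le_total u.length v.length with h | h
  · left
    have := (List.take_isPrefix_take (l := w) (m := u.length) (n := v.length)).mpr (Or.inl h)
    rwa [← List.prefix_iff_eq_take.mp hu, ← List.prefix_iff_eq_take.mp hv] at this
  · right
    have := (List.take_isPrefix_take (l := w) (m := v.length) (n := u.length)).mpr (Or.inl h)
    rwa [← List.prefix_iff_eq_take.mp hu, ← List.prefix_iff_eq_take.mp hv] at this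

-- a string starting with u cannot start with an incomparable v
theorem pv_excl {u v p : String} (hu : PySem.Str.startswith p u = true)
    (h : ¬(u.toList <+: v.toList) ∧ ¬(v.toList <+: u.toList)) :
    PySem.Str.startswith p v = false := by
  cases hv : PySem.Str.startswith p v with
  | false => rfl
  | true =>
      exfalso
      simp only [PySem.Str.startswith_eq, PySem.Chars.startswith_iff] at hu hv
      rcases pv_prefix_total _ _ _ hu hv with h1 | h1
      · exact h.1 h1
      · exact h.2 h1

def pvVal (pfx p : String) : String := PySem.Str.strip (PySem.Str.replace p pfx "")

def pvFold (pfx : String) (parts : List String) (init : String) : String :=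
  parts.foldl (fun acc p => if PySem.Str.startswith p pfx then pvVal pfx p else acc) init

-- per-key effect of one step of A's loop
theorem pv_step_city (d : PySem.Dict String String) (p dflt : String) :
    (pvStepA d p).getD "city" dflt =
      if PySem.Str.startswith p "City:" then pvVal "City:" p else d.getD "city" dflt := by
  unfold pvStepA pvVal
  by_cases h1 : PySem.Str.startswith p "City:" = true
  · rw [if_pos h1, if_pos h1]; simp
  · rw [if_neg h1]
    by_cases h2 : PySem.Str.startswith p "Clinic:" = true
    · rw [if_pos h2, if_neg h1]; simp [PySem.Dict.getD_insert]
    · rw [if_neg h2]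
      by_cases h3 : PySem.Str.startswith p "Preferred Date:" = true
      · rw [if_pos h3, if_neg h1]; simp [PySem.Dict.getD_insert]
      · rw [if_neg h3]
        by_cases h4 : PySem.Str.startswith p "Preferred Time:" = true
        · rw [if_pos h4, if_neg h1]; simp [PySem.Dict.getD_insert]
        · rw [if_neg h4]
          by_cases h5 : PySem.Str.startswith p "Status:" = true
          · rw [if_pos h5, if_neg h1]; simp [PySem.Dict.getD_insert]
          · rw [if_neg h5]
            by_cases h6 : PySem.Str.startswith p "Preference:" = true
            · rw [if_pos h6, if_neg h1]; simp [PySem.Dict.getD_insert]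
            · rw [if_neg h6]
              rw [if_neg h1]

theorem pv_step_clinic (d : PySem.Dict String String) (p dflt : String) :
    (pvStepA d p).getD "clinic" dflt =
      if PySem.Str.startswith p "Clinic:" then pvVal "Clinic:" p else d.getD "clinic" dflt := by
  unfold pvStepA pvVal
  by_cases h1 : PySem.Str.startswith p "City:" = true
  · have hne := pv_excl h1 (v := "Clinic:") ⟨by decide, by decide⟩
    rw [if_pos h1, if_neg (by rw [hne]; exact Bool.false_ne_true)]
    simp [PySem.Dict.getD_insert]
  · rw [if_neg h1]
    by_cases h2 : PySem.Str.startswith p "Clinic:" = true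
    · rw [if_pos h2, if_pos h2]; simp
    · rw [if_neg h2]
      by_cases h3 : PySem.Str.startswith p "Preferred Date:" = true
      · rw [if_pos h3, if_neg h2]; simp [PySem.Dict.getD_insert]
      · rw [if_neg h3]
        by_cases h4 : PySem.Str.startswith p "Preferred Time:" = true
        · rw [if_pos h4, if_neg h2]; simp [PySem.Dict.getD_insert]
        · rw [if_neg h4]
          by_cases h5 : PySem.Str.startswith p "Status:" = true
          · rw [if_pos h5, if_neg h2]; simp [PySem.Dict.getD_insert]
          · rw [if_neg h5]
            by_cases h6 : PySem.Str.startswith p "Preference:" = true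
            · rw [if_pos h6, if_neg h2]; simp [PySem.Dict.getD_insert]
            · rw [if_neg h6]
              rw [if_neg h2]

theorem pv_step_pdate (d : PySem.Dict String String) (p dflt : String) :
    (pvStepA d p).getD "preferred_date" dflt =
      if PySem.Str.startswith p "Preferred Date:" then pvVal "Preferred Date:" p else d.getD "preferred_date" dflt := by
  unfold pvStepA pvVal
  by_cases h1 : PySem.Str.startswith p "City:" = true
  · have hne := pv_excl h1 (v := "Preferred Date:") ⟨by decide, by decide⟩
    rw [if_pos h1, if_neg (by rw [hne]; exact Bool.false_ne_true)]
    simp [PySem.Dict.getD_insert]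
  · rw [if_neg h1]
    by_cases h2 : PySem.Str.startswith p "Clinic:" = true
    · have hne := pv_excl h2 (v := "Preferred Date:") ⟨by decide, by decide⟩
      rw [if_pos h2, if_neg (by rw [hne]; exact Bool.false_ne_true)]
      simp [PySem.Dict.getD_insert]
    · rw [if_neg h2]
      by_cases h3 : PySem.Str.startswith p "Preferred Date:" = true
      · rw [if_pos h3, if_pos h3]; simp
      · rw [if_neg h3]
        by_cases h4 : PySem.Str.startswith p "Preferred Time:" = true
        · rw [if_pos h4, if_neg h3]; simp [PySem.Dict.getD_insert]
        · rw [if_neg h4]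
          by_cases h5 : PySem.Str.startswith p "Status:" = true
          · rw [if_pos h5, if_neg h3]; simp [PySem.Dict.getD_insert]
          · rw [if_neg h5]
            by_cases h6 : PySem.Str.startswith p "Preference:" = true
            · rw [if_pos h6, if_neg h3]; simp [PySem.Dict.getD_insert]
            · rw [if_neg h6]
              rw [if_neg h3]

theorem pv_step_ptime (d : PySem.Dict String String) (p dflt : String) :
    (pvStepA d p).getD "preferred_time" dflt =
      if PySem.Str.startswith p "Preferred Time:" then pvVal "Preferred Time:" p else d.getD "preferred_time" dflt := by
  unfold pvStepA pvVal
  by_cases h1 : PySem.Str.startswith p "City:" = true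
  · have hne := pv_excl h1 (v := "Preferred Time:") ⟨by decide, by decide⟩
    rw [if_pos h1, if_neg (by rw [hne]; exact Bool.false_ne_true)]
    simp [PySem.Dict.getD_insert]
  · rw [if_neg h1]
    by_cases h2 : PySem.Str.startswith p "Clinic:" = true
    · have hne := pv_excl h2 (v := "Preferred Time:") ⟨by decide, by decide⟩
      rw [if_pos h2, if_neg (by rw [hne]; exact Bool.false_ne_true)]
      simp [PySem.Dict.getD_insert]
    · rw [if_neg h2]
      by_cases h3 : PySem.Str.startswith p "Preferred Date:" = true
      · have hne := pv_excl h3 (v := "Preferred Time:") ⟨by decide, by decide⟩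
        rw [if_pos h3, if_neg (by rw [hne]; exact Bool.false_ne_true)]
        simp [PySem.Dict.getD_insert]
      · rw [if_neg h3]
        by_cases h4 : PySem.Str.startswith p "Preferred Time:" = true
        · rw [if_pos h4, if_pos h4]; simp
        · rw [if_neg h4]
          by_cases h5 : PySem.Str.startswith p "Status:" = true
          · rw [if_pos h5, if_neg h4]; simp [PySem.Dict.getD_insert]
          · rw [if_neg h5]
            by_cases h6 : PySem.Str.startswith p "Preference:" = true
            · rw [if_pos h6, if_neg h4]; simp [PySem.Dict.getD_insert]
            · rw [if_neg h6]
              rw [if_neg h4]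

theorem pv_step_status (d : PySem.Dict String String) (p dflt : String) :
    (pvStepA d p).getD "status" dflt =
      if PySem.Str.startswith p "Status:" then pvVal "Status:" p else d.getD "status" dflt := by
  unfold pvStepA pvVal
  by_cases h1 : PySem.Str.startswith p "City:" = true
  · have hne := pv_excl h1 (v := "Status:") ⟨by decide, by decide⟩
    rw [if_pos h1, if_neg (by rw [hne]; exact Bool.false_ne_true)]
    simp [PySem.Dict.getD_insert]
  · rw [if_neg h1]
    by_cases h2 : PySem.Str.startswith p "Clinic:" = true
    · have hne := pv_excl h2 (v := "Status:") ⟨by decide, by decide⟩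
      rw [if_pos h2, if_neg (by rw [hne]; exact Bool.false_ne_true)]
      simp [PySem.Dict.getD_insert]
    · rw [if_neg h2]
      by_cases h3 : PySem.Str.startswith p "Preferred Date:" = true
      · have hne := pv_excl h3 (v := "Status:") ⟨by decide, by decide⟩
        rw [if_pos h3, if_neg (by rw [hne]; exact Bool.false_ne_true)]
        simp [PySem.Dict.getD_insert]
      · rw [if_neg h3]
        by_cases h4 : PySem.Str.startswith p "Preferred Time:" = true
        · have hne := pv_excl h4 (v := "Status:") ⟨by decide, by decide⟩
          rw [if_pos h4, if_neg (by rw [hne]; exact Bool.false_ne_true)]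
          simp [PySem.Dict.getD_insert]
        · rw [if_neg h4]
          by_cases h5 : PySem.Str.startswith p "Status:" = true
          · rw [if_pos h5, if_pos h5]; simp
          · rw [if_neg h5]
            by_cases h6 : PySem.Str.startswith p "Preference:" = true
            · rw [if_pos h6, if_neg h5]; simp [PySem.Dict.getD_insert]
            · rw [if_neg h6]
              rw [if_neg h5]

theorem pv_step_pref (d : PySem.Dict String String) (p dflt : String) :
    (pvStepA d p).getD "preference" dflt =
      if PySem.Str.startswith p "Preference:" then pvVal "Preference:" p else d.getD "preference" dflt := by
  unfold pvStepA pvVal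
  by_cases h1 : PySem.Str.startswith p "City:" = true
  · have hne := pv_excl h1 (v := "Preference:") ⟨by decide, by decide⟩
    rw [if_pos h1, if_neg (by rw [hne]; exact Bool.false_ne_true)]
    simp [PySem.Dict.getD_insert]
  · rw [if_neg h1]
    by_cases h2 : PySem.Str.startswith p "Clinic:" = true
    · have hne := pv_excl h2 (v := "Preference:") ⟨by decide, by decide⟩
      rw [if_pos h2, if_neg (by rw [hne]; exact Bool.false_ne_true)]
      simp [PySem.Dict.getD_insert]
    · rw [if_neg h2]
      by_cases h3 : PySem.Str.startswith p "Preferred Date:" = true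
      · have hne := pv_excl h3 (v := "Preference:") ⟨by decide, by decide⟩
        rw [if_pos h3, if_neg (by rw [hne]; exact Bool.false_ne_true)]
        simp [PySem.Dict.getD_insert]
      · rw [if_neg h3]
        by_cases h4 : PySem.Str.startswith p "Preferred Time:" = true
        · have hne := pv_excl h4 (v := "Preference:") ⟨by decide, by decide⟩
          rw [if_pos h4, if_neg (by rw [hne]; exact Bool.false_ne_true)]
          simp [PySem.Dict.getD_insert]
        · rw [if_neg h4]
          by_cases h5 : PySem.Str.startswith p "Status:" = true
          · have hne := pv_excl h5 (v := "Preference:") ⟨by decide, by decide⟩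
            rw [if_pos h5, if_neg (by rw [hne]; exact Bool.false_ne_true)]
            simp [PySem.Dict.getD_insert]
          · rw [if_neg h5]
            by_cases h6 : PySem.Str.startswith p "Preference:" = true
            · rw [if_pos h6, if_pos h6]; simp
            · rw [if_neg h6]
              rw [if_neg h6]

-- A's whole loop, one key at a time
theorem pv_foldl_getD (key pfx : String)
    (hstep : ∀ (d : PySem.Dict String String) (p dflt : String),
      (pvStepA d p).getD key dflt = if PySem.Str.startswith p pfx then pvVal pfx p else d.getD key dflt)
    (parts : List String) (d : PySem.Dict String String) (dflt : String) :
    (parts.foldl pvStepA d).getD key dflt = pvFold pfx parts (d.getD key dflt) := by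
  induction parts generalizing d with
  | nil => rfl
  | cons p rest ih =>
      simp only [List.foldl_cons, pvFold] at *
      rw [ih, hstep]

-- the keys of A's dict never change
theorem pv_step_keys (d : PySem.Dict String String) (p : String)
    (h : d.keys = ["city", "clinic", "preferred_date", "preferred_time", "status", "preference"]) :
    (pvStepA d p).keys = ["city", "clinic", "preferred_date", "preferred_time", "status", "preference"] := by
  have hc : ∀ k, k ∈ d.keys → d.contains k = true := by
    intro k hk; exact (PySem.Dict.contains_iff_mem_keys _ _).mpr hk
  unfold pvStepA
  split_ifs <;>
    first
      | exact h
      | (rw [PySem.Dict.keys_insert_of_contains _ _ (hc _ (by rw [h]; simp))]; exact h)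

theorem pv_foldl_keys (parts : List String) (d : PySem.Dict String String)
    (h : d.keys = ["city", "clinic", "preferred_date", "preferred_time", "status", "preference"]) :
    (parts.foldl pvStepA d).keys = ["city", "clinic", "preferred_date", "preferred_time", "status", "preference"] := by
  induction parts generalizing d with
  | nil => exact h
  | cons p rest ih => exact ih _ (pv_step_keys d p h)

-- a last-wins fold equals a find on the reversed list
theorem pv_fold_eq_lastValue (pfx dflt : String) (parts : List String) :
    pvFold pfx parts dflt = pvLastValue parts pfx dflt := by
  unfold pvFold pvLastValue
  induction parts generalizing dflt with
  | nil => rfl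
  | cons p rest ih =>
      simp only [List.foldl_cons, List.reverse_cons, List.find?_append]
      rw [ih]
      cases hf : rest.reverse.find? (fun part => PySem.Str.startswith part pfx) with
      | some q => simp
      | none =>
          cases hp : PySem.Str.startswith p pfx with
          | true => simp only [PySem.Str.startswith_eq] at hp; simp [hp, pvVal]
          | false => simp only [PySem.Str.startswith_eq] at hp; simp [hp]

-- ===== VERDICT (by name: the statement is the Claim_ definition above) =====
theorem extract_appointment_details_py_spec : Claim_equal_extract_appointment_details_py := by
  intro description _
  unfold Spec_extract_appointment_details_py
  unfold extract_appointment_details_py extract_appointment_details_py_alt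
  by_cases h : description = ""
  · subst h; decide
  · simp only [h, if_false]
    set parts := (PySem.Str.split? description " | ").getD [] with hparts
    have hdk : pvDefaultsA.keys = ["city", "clinic", "preferred_date", "preferred_time", "status", "preference"] := by decide
    have hk := pv_foldl_keys parts pvDefaultsA hdk
    have hnd : (parts.foldl pvStepA pvDefaultsA).keys.Nodup := by rw [hk]; decide
    rw [PySem.Dict.items_eq_map_keys _ hnd "", hk]
    simp only [List.map_cons, List.map_nil]
    rw [pv_foldl_getD _ _ pv_step_city, pv_foldl_getD _ _ pv_step_clinic,
      pv_foldl_getD _ _ pv_step_pdate, pv_foldl_getD _ _ pv_step_ptime,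
      pv_foldl_getD _ _ pv_step_status, pv_foldl_getD _ _ pv_step_pref]
    rw [pv_fold_eq_lastValue, pv_fold_eq_lastValue, pv_fold_eq_lastValue,
      pv_fold_eq_lastValue, pv_fold_eq_lastValue, pv_fold_eq_lastValue]
    have e1 : pvDefaultsA.getD "city" "" = "Unknown" := by decide
    have e2 : pvDefaultsA.getD "clinic" "" = "Unknown" := by decide
    have e3 : pvDefaultsA.getD "preferred_date" "" = "Not specified" := by decide
    have e4 : pvDefaultsA.getD "preferred_time" "" = "Not specified" := by decide
    have e5 : pvDefaultsA.getD "status" "" = "Unknown" := by decide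
    have e6 : pvDefaultsA.getD "preference" "" = "" := by decide
    rw [e1, e2, e3, e4, e5, e6]
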